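-- pv_equiv track=rewrite | github.com/Czok12/llkjj_ml | src/models/validation.py | is_valid_skr03_account
-- ===== SOURCE A (Python) =====
-- def is_valid_skr03_account(account: str) -> bool:
--     """Prüfe ob SKR03-Kontonummer gültig ist."""
--     if not account.isdigit() or len(account) != 4:
--         return False
--
--     account_int = int(account)
--     valid_ranges = [
--         (1000, 1999),
--         (2000, 2999),
--         (3000, 3999),
--         (4000, 4999),
--         (5000, 5999),
--         (6000, 6999),
--         (7000, 7999),
--         (8000, 8999),
--         (9000, 9999),
--     ]
--
--     return any(start <= account_int <= end for start, end in valid_ranges)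
-- ===== SOURCE B (Python) =====
-- def is_valid_skr03_account(account: str) -> bool:
--     """Prüfe ob SKR03-Kontonummer gültig ist."""
--     if len(account) != 4:
--         return False
--     first, rest = account[0], account[1:]
--     return '1' <= first <= '9' and all('0' <= c <= '9' for c in rest)
-- ===== Notes on version B (the rewrite author's own statement) =====
-- stated objective: alternative
-- what changed: B never converts the string to an integer: instead of A's isdigit guard, int() conversion and any() scan over a 9-entry range table, B decides validity purely on characters — length 4, a nonzero leading decimal digit, and decimal digits everywhere else.
import Mathlib
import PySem

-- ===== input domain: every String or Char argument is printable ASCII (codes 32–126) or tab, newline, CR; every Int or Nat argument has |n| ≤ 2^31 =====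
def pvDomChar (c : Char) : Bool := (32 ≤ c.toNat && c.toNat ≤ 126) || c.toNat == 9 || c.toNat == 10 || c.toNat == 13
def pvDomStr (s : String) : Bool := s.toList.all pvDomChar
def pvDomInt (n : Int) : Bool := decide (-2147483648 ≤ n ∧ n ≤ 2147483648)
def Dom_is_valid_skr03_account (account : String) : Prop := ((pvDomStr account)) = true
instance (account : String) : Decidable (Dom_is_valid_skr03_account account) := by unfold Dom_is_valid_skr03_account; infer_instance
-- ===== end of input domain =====

-- B replaces A's int() conversion and 9-entry range table scanned with any() by a
-- purely character-level test: length 4, a nonzero leading decimal digit, decimal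
-- digits everywhere else; objective: alternative (no numeric conversion at all).


-- ===== PORT A =====
def is_valid_skr03_account (account : String) : Bool :=
  if !(PySem.Str.strIsdigit account) || (PySem.Str.len account != 4) then false
  else
    -- account_int = int(account); isdigit guarantees Python's int() succeeds,
    -- so the `none` branch (Python: ValueError) is unreachable
    match PySem.Int.ofStr? account with
    | none => false
    | some account_int =>
      let valid_ranges : List (Int × Int) :=
        [(1000, 1999), (2000, 2999), (3000, 3999), (4000, 4999), (5000, 5999),
         (6000, 6999), (7000, 7999), (8000, 8999), (9000, 9999)]
      valid_ranges.any (fun r => decide (r.1 ≤ account_int) && decide (account_int ≤ r.2))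

-- ===== PORT B =====
def is_valid_skr03_account_alt (account : String) : Bool :=
  if PySem.Str.len account != 4 then false
  else
    -- first, rest = account[0], account[1:]; account[0] cannot raise since len = 4
    match PySem.Str.pyGet? account 0 with
    | none => false
    | some first =>
      let rest := PySem.Str.slice account (some 1) none
      (decide ('1' ≤ first) && decide (first ≤ '9'))
        && rest.toList.all (fun ch => decide ('0' ≤ ch) && decide (ch ≤ '9'))

-- ===== PRECONDITION & SPEC =====
def Spec_is_valid_skr03_account (account : String) (out : Bool) : Prop := out = is_valid_skr03_account_alt account
instance (account : String) (out : Bool) : Decidable (Spec_is_valid_skr03_account account out) := by unfold Spec_is_valid_skr03_account; infer_instance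

-- ===== CLAIM (what is proved, stated in full; the proofs are below) =====
def Claim_equal_is_valid_skr03_account : Prop := ∀ (account : String), Dom_is_valid_skr03_account account → Spec_is_valid_skr03_account account (is_valid_skr03_account account)

-- ===== LEMMAS AND PROOFS =====

-- the nine contiguous sub-ranges cover exactly the interval [1000, 9999]
lemma pvRangesAny (n : Int) :
    (([(1000, 1999), (2000, 2999), (3000, 3999), (4000, 4999), (5000, 5999),
       (6000, 6999), (7000, 7999), (8000, 8999), (9000, 9999)] : List (Int × Int)).any
        (fun r => decide (r.1 ≤ n) && decide (n ≤ r.2)))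
      = (decide (1000 ≤ n) && decide (n ≤ 9999)) := by
  rw [Bool.eq_iff_iff]
  simp only [List.any_cons, List.any_nil, Bool.or_false, Bool.or_eq_true,
    Bool.and_eq_true, decide_eq_true_eq]
  omega

-- int() of four decimal digit chars lands in [1000, 9999] iff the first digit is nonzero,
-- verified over all 10^4 digit quadruples
set_option maxHeartbeats 1200000 in
lemma pvQuadFin : ∀ (i j k l : Fin 10),
    (match PySem.Int.ofChars? [Char.ofNat (48 + i.val), Char.ofNat (48 + j.val),
        Char.ofNat (48 + k.val), Char.ofNat (48 + l.val)] with
      | none => false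
      | some n => decide (1000 ≤ n) && decide (n ≤ 9999))
    = decide (1 ≤ i.val) := by decide

-- the same, for arbitrary digit characters
lemma pvDigitBounds (c : Char) (h : PySem.Chars.isdigit c = true) :
    48 ≤ c.toNat ∧ c.toNat ≤ 57 := by
  simp only [PySem.Chars.isdigit, Bool.and_eq_true, decide_eq_true_eq,
    Char.le_def, UInt32.le_iff_toNat_le] at h
  exact ⟨h.1, h.2⟩

lemma pvOneLe (c : Char) : ('1' ≤ c) ↔ 49 ≤ c.toNat := by
  simp only [Char.le_def, UInt32.le_iff_toNat_le]
  exact Iff.rfl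

lemma pvLeNine (c : Char) : (c ≤ '9') ↔ c.toNat ≤ 57 := by
  simp only [Char.le_def, UInt32.le_iff_toNat_le]
  exact Iff.rfl

lemma pvQuad (a b c d : Char)
    (ha : PySem.Chars.isdigit a = true) (hb : PySem.Chars.isdigit b = true)
    (hc : PySem.Chars.isdigit c = true) (hd : PySem.Chars.isdigit d = true) :
    (match PySem.Int.ofChars? [a, b, c, d] with
      | none => false
      | some n => decide (1000 ≤ n) && decide (n ≤ 9999))
    = (decide ('1' ≤ a) && decide (a ≤ '9')) := by
  obtain ⟨ha1, ha2⟩ := pvDigitBounds a ha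
  obtain ⟨hb1, hb2⟩ := pvDigitBounds b hb
  obtain ⟨hc1, hc2⟩ := pvDigitBounds c hc
  obtain ⟨hd1, hd2⟩ := pvDigitBounds d hd
  have ea : a = Char.ofNat (48 + (a.toNat - 48)) := by
    rw [Nat.add_sub_cancel' ha1]; exact (Char.ofNat_toNat a).symm
  have eb : b = Char.ofNat (48 + (b.toNat - 48)) := by
    rw [Nat.add_sub_cancel' hb1]; exact (Char.ofNat_toNat b).symm
  have ec : c = Char.ofNat (48 + (c.toNat - 48)) := by
    rw [Nat.add_sub_cancel' hc1]; exact (Char.ofNat_toNat c).symm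
  have ed : d = Char.ofNat (48 + (d.toNat - 48)) := by
    rw [Nat.add_sub_cancel' hd1]; exact (Char.ofNat_toNat d).symm
  have key := pvQuadFin ⟨a.toNat - 48, by omega⟩ ⟨b.toNat - 48, by omega⟩
    ⟨c.toNat - 48, by omega⟩ ⟨d.toNat - 48, by omega⟩
  calc (match PySem.Int.ofChars? [a, b, c, d] with
        | none => false
        | some n => decide (1000 ≤ n) && decide (n ≤ 9999))
      = decide (1 ≤ a.toNat - 48) := by
        conv_lhs => rw [ea, eb, ec, ed]
        exact key
    _ = (decide ('1' ≤ a) && decide (a ≤ '9')) := by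
        rw [Bool.eq_iff_iff]
        simp only [Bool.and_eq_true, decide_eq_true_eq, pvOneLe, pvLeNine]
        omega

lemma pvLen4 (cs : List Char) (h : cs.length = 4) : ∃ a b c d, cs = [a, b, c, d] :=
  List.length_eq_four.mp h

-- ===== VERDICT (by name: the statement is the Claim_ definition above) =====
theorem is_valid_skr03_account_spec : Claim_equal_is_valid_skr03_account := by
  intro account _
  unfold Spec_is_valid_skr03_account is_valid_skr03_account is_valid_skr03_account_alt
  by_cases hlen : account.toList.length = 4
  · obtain ⟨a, b, c, d, h4⟩ := pvLen4 account.toList hlen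
    have hget : PySem.Str.pyGet? account 0 = some a := by simp [pysem, h4]
    have hB : (PySem.Str.slice account (some 1) none).toList = [b, c, d] := by
      simp [pysem, h4]
    have hlen4 : ((PySem.Str.len account) != 4) = false := by
      simp [pysem, hlen]
    simp only [PySem.Str.strIsdigit, PySem.Int.ofStr?, h4, hget, hB, hlen4,
      Bool.or_false, Bool.not_eq_eq_eq_not]
    by_cases hdig : (PySem.Chars.strIsdigit [a, b, c, d]) = true
    · simp only [PySem.Chars.strIsdigit, List.all_cons, List.all_nil,
        List.isEmpty_cons, Bool.not_false, Bool.true_and, Bool.and_true,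
        Bool.and_eq_true] at hdig
      obtain ⟨ha, hb, hc, hd⟩ := hdig
      simp only [PySem.Chars.strIsdigit, List.all_cons, List.all_nil,
        List.isEmpty_cons, Bool.not_false, Bool.and_true,
        ha, hb, hc, hd, Bool.not_true]
      simp only [Bool.true_eq_false, Bool.false_eq_true, if_false]
      cases hoc : PySem.Int.ofChars? [a, b, c, d] with
      | none =>
        have hq := pvQuad a b c d ha hb hc hd
        rw [hoc] at hq
        simp only [← hq, Bool.false_and]
      | some n =>
        have hq := pvQuad a b c d ha hb hc hd
        rw [hoc] at hq
        simp only [pvRangesAny n, hq]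
        have hbd : (decide ('0' ≤ b) && decide (b ≤ '9')) = true := hb
        have hcd : (decide ('0' ≤ c) && decide (c ≤ '9')) = true := hc
        have hdd : (decide ('0' ≤ d) && decide (d ≤ '9')) = true := hd
        rw [hbd, hcd, hdd]
        simp
    · -- some character is not a digit: both sides are false
      simp only [Bool.not_eq_true] at hdig
      simp only [hdig, List.all_cons, List.all_nil, Bool.and_true]
      simp only [Bool.false_eq_true, if_false]
      simp only [Bool.not_true, if_true]
      rw [eq_comm]
      simp only [PySem.Chars.strIsdigit, List.all_cons, List.all_nil,
        List.isEmpty_cons, Bool.not_false, Bool.true_and, Bool.and_true,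
        Bool.and_eq_false_iff, PySem.Chars.isdigit, decide_eq_false_iff_not,
        Char.le_def, UInt32.le_iff_toNat_le] at hdig
      simp only [Bool.and_eq_false_iff, decide_eq_false_iff_not, Char.le_def,
        UInt32.le_iff_toNat_le]
      have h0 : ('0').val.toNat = 48 := rfl
      have h1 : ('1').val.toNat = 49 := rfl
      have h9 : ('9').val.toNat = 57 := rfl
      omega
  · -- length ≠ 4: both guards fire
    have hA : ((PySem.Str.len account) != 4) = true := by
      simp only [pysem, bne_iff_ne, ne_eq]
      intro h; exact hlen (by exact_mod_cast h)
    simp only [hA, Bool.or_true]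
    rfl
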